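-- pv_equiv track=rewrite | github.com/Teacher-CHA/CS50P | lecture2/problemset2/plates相关的尝试/plates.py | is_lastdigit
-- ===== SOURCE A (Python) =====
-- def is_lastdigit(x):#此函数为检验是否数字后还有字母
--     hasbeenmetdigit = False
--     for letter in x:
--         if letter.isdigit():
--             hasbeenmetdigit = True
-- #continue 的含义：跳过当前循环的剩余部分，立即开始下一次循环迭代。这里万万不能用continue
--         if hasbeenmetdigit == True and letter.isalpha():
--             return False
--     return True
-- ===== SOURCE B (Python) =====
-- def is_lastdigit(x):
--     idx = next((i for i, c in enumerate(x) if c.isdigit()), None)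
--     if idx is None:
--         return True
--     return not any(c.isalpha() for c in x[idx:])
-- ===== Notes on version B (the rewrite author's own statement) =====
-- stated objective: alternative
-- what changed: Replaced the single flag-carrying loop with a two-stage locate-then-scan: find the index of the first digit, then check the suffix from there for any letter.
import Mathlib
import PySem

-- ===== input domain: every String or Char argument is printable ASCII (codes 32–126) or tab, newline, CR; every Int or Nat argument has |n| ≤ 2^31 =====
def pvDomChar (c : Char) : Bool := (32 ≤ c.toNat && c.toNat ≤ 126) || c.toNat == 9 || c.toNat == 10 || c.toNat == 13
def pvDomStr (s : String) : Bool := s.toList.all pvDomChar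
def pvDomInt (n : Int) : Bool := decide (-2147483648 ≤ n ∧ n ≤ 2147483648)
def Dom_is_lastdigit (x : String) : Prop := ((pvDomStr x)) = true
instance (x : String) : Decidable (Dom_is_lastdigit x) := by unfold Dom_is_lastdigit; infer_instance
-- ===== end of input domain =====

-- B replaces A's flag-carrying single pass by a locate-first-digit-then-scan-suffix decomposition (same cost).
-- ===== PORT A =====
-- the for-loop over x with the hasbeenmetdigit flag and the early 'return False'
def pvLoopA : List Char → Bool → Bool
  | [], _ => true
  | c :: cs, flag =>
    let flag' := if PySem.Chars.isdigit c then true else flag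
    if flag' && PySem.Chars.isalpha c then false else pvLoopA cs flag'

def is_lastdigit (x : String) : Bool := pvLoopA x.toList false

-- ===== PORT B =====
def is_lastdigit_alt (x : String) : Bool :=
  match (x.toList).findIdx? PySem.Chars.isdigit with
  | none => true
  | some i => !((x.toList.drop i).any PySem.Chars.isalpha)

-- ===== PRECONDITION & SPEC =====
def Spec_is_lastdigit (x : String) (out : Bool) : Prop := out = is_lastdigit_alt x
instance (x : String) (out : Bool) : Decidable (Spec_is_lastdigit x out) := by unfold Spec_is_lastdigit; infer_instance

-- ===== CLAIM (what is proved, stated in full; the proofs are below) =====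
def Claim_equal_is_lastdigit : Prop := ∀ (x : String), Dom_is_lastdigit x → Spec_is_lastdigit x (is_lastdigit x)

-- ===== LEMMAS AND PROOFS =====

-- ===== VERDICT (by name: the statement is the Claim_ definition above) =====
-- B's value as a function of the character list, with the flag made explicit
def pvAltOn (cs : List Char) (flag : Bool) : Bool :=
  if flag then !(cs.any PySem.Chars.isalpha)
  else match cs.findIdx? PySem.Chars.isdigit with
    | none => true
    | some i => !((cs.drop i).any PySem.Chars.isalpha)

lemma pvLoopA_eq_altOn : ∀ (cs : List Char) (flag : Bool), pvLoopA cs flag = pvAltOn cs flag := by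
  intro cs
  induction cs with
  | nil => intro flag; cases flag <;> simp [pvLoopA, pvAltOn]
  | cons c cs ih =>
    intro flag
    cases flag with
    | true =>
      simp only [pvLoopA, pvAltOn, if_pos, List.any_cons]
      by_cases ha : PySem.Chars.isalpha c <;>
        simp [ha, ih, pvAltOn, PySem.Chars.isdigit]
    | false =>
      by_cases hd : PySem.Chars.isdigit c
      · by_cases ha : PySem.Chars.isalpha c <;>
          simp [pvLoopA, pvAltOn, hd, ha, ih, List.findIdx?_cons]
      · simp [pvLoopA, pvAltOn, hd, ih, List.findIdx?_cons]
        cases h : cs.findIdx? PySem.Chars.isdigit <;> simp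

theorem is_lastdigit_spec : Claim_equal_is_lastdigit := by
  intro x _
  unfold Spec_is_lastdigit is_lastdigit is_lastdigit_alt
  rw [pvLoopA_eq_altOn]
  simp [pvAltOn]
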